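-- pv_equiv track=rewrite | github.com/fmoody/aoc | 4/Day4Puzzle1.py | update_cards_state
-- ===== SOURCE A (Python) =====
-- def update_cards_state(cards_state, bingo_cards, number_drawn):
--     for card_number in range(len(bingo_cards)):
--         for row_number in range(5):
--             if number_drawn in bingo_cards[card_number][row_number]:
--                 position = bingo_cards[card_number][row_number].index(number_drawn)
--                 cards_state[card_number][row_number][position] = True
--
--                 while(number_drawn in bingo_cards[card_number][row_number][position+1:]):
--                     position = bingo_cards[card_number][row_number].index(number_drawn, position+1)
--                     cards_state[card_number][row_number][position] = True
--
--     return cards_state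
-- ===== SOURCE B (Python) =====
-- # Single direct pass: enumerate each cell of each of the 5 rows and mark matching cells.
-- # Mutates cards_state in place (as A does) and returns it.
-- def update_cards_state(cards_state, bingo_cards, number_drawn):
--     for card_number, card in enumerate(bingo_cards):
--         for row_number in range(5):
--             for cell_index, value in enumerate(card[row_number]):
--                 if value == number_drawn:
--                     cards_state[card_number][row_number][cell_index] = True
--     return cards_state
-- ===== Notes on version B (the rewrite author's own statement) =====
-- stated objective: simpler
-- what changed: Replaces A's membership test plus repeated .index rescans driven by an advancing position cursor in a while loop with a single enumerate pass per row that marks every matching cell directly.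
import Mathlib
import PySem

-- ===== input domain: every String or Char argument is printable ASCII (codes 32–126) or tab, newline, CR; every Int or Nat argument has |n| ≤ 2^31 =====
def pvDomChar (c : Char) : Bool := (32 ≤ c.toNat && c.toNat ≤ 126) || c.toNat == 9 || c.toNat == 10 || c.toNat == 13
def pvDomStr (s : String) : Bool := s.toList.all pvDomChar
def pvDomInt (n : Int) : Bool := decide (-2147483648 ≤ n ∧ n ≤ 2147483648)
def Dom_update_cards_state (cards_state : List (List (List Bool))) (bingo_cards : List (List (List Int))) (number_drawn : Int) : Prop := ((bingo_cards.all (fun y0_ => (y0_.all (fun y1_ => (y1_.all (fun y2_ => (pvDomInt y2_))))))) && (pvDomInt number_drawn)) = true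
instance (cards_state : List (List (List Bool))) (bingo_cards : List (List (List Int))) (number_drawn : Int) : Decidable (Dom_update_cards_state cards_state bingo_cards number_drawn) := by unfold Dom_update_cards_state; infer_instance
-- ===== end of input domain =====

-- B replaces A's `in`-guard plus repeated `.index` rescans from an advancing cursor by one direct
-- enumerate pass per row that assigns every matching cell (objective: simpler).  Both Pythons
-- mutate cards_state in place and return it; the theorems below are about the returned value.

-- ===== PORT A =====
-- Python's `while number_drawn in row[position+1:]: position = row.index(number_drawn, position+1);
-- cards_state[c][r][position] = True`: the slice row[position+1:] (position ≥ 0) is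
-- `row.drop (pos+1)`, and `.index(n, pos+1)` is pos+1 + the index of n in that slice; the
-- membership test and the .index call are fused into one option match on PySem.List.index?
-- (Python: `v in xs` holds iff `xs.index(v)` succeeds — exact).  The in-place assignment
-- `sr[position] = True` (in range under Pre_) is `sr.set position true`.
def whileA (row : List Int) (n : Int) (sr : List Bool) (pos : Nat) : List Bool :=
  match h : PySem.List.index? (row.drop (pos + 1)) n with
  | some k => whileA row n (sr.set (pos + 1 + k) true) (pos + 1 + k)
  | none => sr
termination_by row.length - pos
decreasing_by
  obtain ⟨hk, -, -⟩ := PySem.List.getElem_of_index?_eq_some h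
  simp only [List.length_drop] at hk
  omega

-- `bingo_cards[card_number][row_number]` is written out each time (as Python re-evaluates it),
-- with getD (in range under Pre_); the in-place assignment to cards_state[c][r][...] is
-- List.modify at c, then at r.
def update_cards_state (cards_state : List (List (List Bool))) (bingo_cards : List (List (List Int))) (number_drawn : Int) : List (List (List Bool)) :=
  (List.range bingo_cards.length).foldl (fun st card_number =>
    (List.range 5).foldl (fun st row_number =>
      match PySem.List.index? ((bingo_cards.getD card_number []).getD row_number []) number_drawn with
      | some position =>
          st.modify card_number (fun card => card.modify row_number (fun sr =>
            whileA ((bingo_cards.getD card_number []).getD row_number []) number_drawn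
              (sr.set position true) position))
      | none => st) st) cards_state

-- ===== PORT B =====
-- `for card_number, card in enumerate(bingo_cards): for row_number in range(5):
--    for cell_index, value in enumerate(card[row_number]):
--      if value == number_drawn: cards_state[card_number][row_number][cell_index] = True`.
-- enumerate indices are ≥ 0, so .toNat is exact; `card[row_number]` is getD (in range under
-- Pre_); the in-place assignment is List.modify at card_number, then at row_number.
def update_cards_state_alt (cards_state : List (List (List Bool))) (bingo_cards : List (List (List Int))) (number_drawn : Int) : List (List (List Bool)) :=
  (PySem.List.enumerate bingo_cards).foldl (fun st p =>
    (List.range 5).foldl (fun st row_number =>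
      (PySem.List.enumerate ((p.2).getD row_number [])).foldl (fun st q =>
        if q.2 = number_drawn then
          st.modify p.1.toNat (fun card => card.modify row_number (fun sr =>
            sr.set q.1.toNat true))
        else st) st) st) cards_state

-- ===== PRECONDITION & SPEC =====
-- Pre_ is exactly the set of inputs on which the Python A returns (no IndexError): every bingo
-- card has at least 5 rows, and whenever number_drawn occurs in one of the first 5 rows of a
-- card, cards_state has that card and row, and no occurrence position falls beyond the end of
-- the corresponding state row.
def Pre_update_cards_state (cards_state : List (List (List Bool))) (bingo_cards : List (List (List Int))) (number_drawn : Int) : Prop :=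
  (∀ card ∈ bingo_cards, 5 ≤ card.length) ∧
  ∀ c < bingo_cards.length, ∀ r < 5,
    number_drawn ∈ (bingo_cards.getD c []).getD r [] →
      c < cards_state.length ∧ r < (cards_state.getD c []).length ∧
        number_drawn ∉ ((bingo_cards.getD c []).getD r []).drop ((cards_state.getD c []).getD r []).length
instance (cards_state : List (List (List Bool))) (bingo_cards : List (List (List Int))) (number_drawn : Int) : Decidable (Pre_update_cards_state cards_state bingo_cards number_drawn) := by unfold Pre_update_cards_state; infer_instance

def pvWitness_update_cards_state : List (List (List Bool)) × List (List (List Int)) × Int :=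
  ([[[false], [false], [false], [false], [false]]], [[[1], [2], [3], [4], [5]]], 3)

def Spec_update_cards_state (cards_state : List (List (List Bool))) (bingo_cards : List (List (List Int))) (number_drawn : Int) (out : List (List (List Bool))) : Prop := out = update_cards_state_alt cards_state bingo_cards number_drawn
instance (cards_state : List (List (List Bool))) (bingo_cards : List (List (List Int))) (number_drawn : Int) (out : List (List (List Bool))) : Decidable (Spec_update_cards_state cards_state bingo_cards number_drawn out) := by unfold Spec_update_cards_state; infer_instance

-- ===== CLAIM (what is proved, stated in full; the proofs are below) =====
def Claim_equal_update_cards_state : Prop := ∀ (cards_state : List (List (List Bool))) (bingo_cards : List (List (List Int))) (number_drawn : Int), Dom_update_cards_state cards_state bingo_cards number_drawn → Pre_update_cards_state cards_state bingo_cards number_drawn → Spec_update_cards_state cards_state bingo_cards number_drawn (update_cards_state cards_state bingo_cards number_drawn)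

-- ===== LEMMAS AND PROOFS =====

-- The per-row marking both programs perform, as a plain fold over the row; A's guard+index+while
-- machinery and B's inner loop are both proved equal to it.
def markRow (sr : List Bool) (row : List Int) (n : Int) : List Bool :=
  (PySem.List.enumerate row).foldl (fun sr p => if p.2 = n then sr.set p.1.toNat true else sr) sr

theorem modify_pointwise_id {α : Type} (l : List α) (i : Nat) (f : α → α) (hf : ∀ a, f a = a) :
    l.modify i f = l := by
  apply List.ext_getElem?
  intro j
  simp [List.getElem?_modify, hf]

theorem modify_modify {α : Type} (l : List α) (i : Nat) (f g : α → α) :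
    (l.modify i f).modify i g = l.modify i (fun a => g (f a)) := by
  apply List.ext_getElem?
  intro j
  simp only [List.getElem?_modify]
  cases l[j]? <;> simp <;> split <;> simp

theorem foldl_modify_fix {α γ : Type} (L : List γ) (c : Nat) (F : γ → α → α) (st : List α) :
    L.foldl (fun st r => st.modify c (F r)) st
      = st.modify c (fun x => L.foldl (fun x r => F r x) x) := by
  induction L generalizing st with
  | nil => simp [modify_pointwise_id]
  | cons r L ih => simp only [List.foldl_cons]; rw [ih, modify_modify]

theorem getElem?_foldl_range_modify {α : Type} (k : Nat) (F : Nat → α → α) (xs : List α) (i : Nat) :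
    ((List.range k).foldl (fun st c => st.modify c (F c)) xs)[i]?
      = if i < k then xs[i]?.map (F i) else xs[i]? := by
  induction k with
  | zero => simp
  | succ k ih =>
    rw [List.range_succ, List.foldl_append, List.foldl_cons, List.foldl_nil,
      List.getElem?_modify, ih]
    rcases Nat.lt_trichotomy i k with h | h | h
    · rw [if_pos h, if_pos (by omega : i < k + 1)]
      cases xs[i]? <;> simp [show k ≠ i by omega]
    · subst h
      rw [if_neg (by omega : ¬ i < i), if_pos (by omega : i < i + 1)]
      cases xs[i]? <;> simp
    · rw [if_neg (by omega : ¬ i < k), if_neg (by omega : ¬ i < k + 1)]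
      cases xs[i]? <;> simp [show k ≠ i by omega]

theorem getElem?_foldl_enum_modify {α β : Type} (G : β → α → α) (d : β) (ys : List β) (s : Nat)
    (st : List α) (i : Nat) :
    ((PySem.List.enumerate ys (s : Int)).foldl (fun st p => st.modify p.1.toNat (G p.2)) st)[i]?
      = if s ≤ i ∧ i - s < ys.length then st[i]?.map (G (ys.getD (i - s) d)) else st[i]? := by
  induction ys generalizing s st with
  | nil => simp [PySem.List.enumerate_nil]
  | cons y ys ih =>
    rw [PySem.List.enumerate_cons, List.foldl_cons]
    have hcast : (s : Int) + 1 = ((s + 1 : Nat) : Int) := by push_cast; ring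
    rw [hcast, ih]
    rcases Nat.lt_trichotomy i s with h | h | h
    · rw [if_neg (fun hc => absurd hc.1 (by omega)),
        if_neg (fun hc : s ≤ i ∧ _ => absurd hc.1 (by omega))]
      simp [List.getElem?_modify, show s ≠ i by omega]
    · subst h
      rw [if_neg (fun hc => absurd hc.1 (by omega)),
        if_pos ⟨Nat.le_refl _, by simp [Nat.sub_self]⟩]
      simp [Nat.sub_self, List.getElem?_modify]
    · have h1 : i - s = (i - (s + 1)) + 1 := by omega
      have hm : (st.modify s (G y))[i]? = st[i]? := by
        simp [List.getElem?_modify, show s ≠ i by omega]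
      simp [h1, hm, List.getD_cons_succ, show s + 1 ≤ i by omega, show s ≤ i by omega,
        List.length_cons, Nat.succ_lt_succ_iff]

theorem foldMark_getElem? (row : List Int) (n : Int) (s : Nat) (sr : List Bool) (i : Nat) :
    ((PySem.List.enumerate row (s : Int)).foldl
        (fun sr p => if p.2 = n then sr.set p.1.toNat true else sr) sr)[i]?
      = if s ≤ i ∧ row[i - s]? = some n then sr[i]?.map (fun _ => true) else sr[i]? := by
  induction row generalizing s sr with
  | nil => simp [PySem.List.enumerate_nil]
  | cons x xs ih =>
    rw [PySem.List.enumerate_cons, List.foldl_cons]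
    have hcast : (s : Int) + 1 = ((s + 1 : Nat) : Int) := by push_cast; ring
    rw [hcast, ih]
    have htn : ((s : Int)).toNat = s := Int.toNat_natCast s
    rcases Nat.lt_trichotomy i s with h | h | h
    · rw [if_neg (fun hc => absurd hc.1 (by omega)),
        if_neg (fun hc : s ≤ i ∧ _ => absurd hc.1 (by omega))]
      by_cases hx : x = n <;> simp [hx, htn, List.getElem?_set, show s ≠ i by omega]
    · subst h
      rw [if_neg (fun hc => absurd hc.1 (by omega))]
      by_cases hx : x = n
      · have hcond : i ≤ i ∧ (x :: xs)[i - i]? = some n :=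
          ⟨Nat.le_refl _, by simp [Nat.sub_self, hx]⟩
        rw [if_pos hcond]
        simp only [hx, if_pos rfl, htn]
        by_cases hs : i < sr.length
        · simp [List.getElem?_set, hs, List.getElem?_eq_getElem hs]
        · simp [List.getElem?_set, hs, List.getElem?_eq_none (by omega : sr.length ≤ i)]
      · rw [if_neg (by simp [Nat.sub_self, hx])]
        simp [hx]
    · have h1 : i - s = (i - (s + 1)) + 1 := by omega
      rw [h1, List.getElem?_cons_succ]
      have hsr : (if x = n then sr.set s true else sr)[i]? = sr[i]? := by
        by_cases hx : x = n <;> simp [hx, List.getElem?_set, show s ≠ i by omega]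
      simp [htn, hsr, show s + 1 ≤ i by omega, show s ≤ i by omega]

theorem markRow_getElem? (sr : List Bool) (row : List Int) (n : Int) (i : Nat) :
    (markRow sr row n)[i]?
      = if row[i]? = some n then sr[i]?.map (fun _ => true) else sr[i]? := by
  have h := foldMark_getElem? row n 0 sr i
  simpa [markRow] using h

theorem whileA_getElem? (row : List Int) (n : Int) (sr : List Bool) (pos : Nat) (i : Nat) :
    (whileA row n sr pos)[i]?
      = if pos < i ∧ row[i]? = some n then sr[i]?.map (fun _ => true) else sr[i]? := by
  induction sr, pos using whileA.induct row n with
  | case1 sr pos k h ih =>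
    rw [whileA, h]
    obtain ⟨hk, hv, hmin⟩ := PySem.List.getElem_of_index?_eq_some h
    have hlen : pos + 1 + k < row.length := by
      simp only [List.length_drop] at hk; omega
    have hval : row[pos + 1 + k]? = some n := by
      rw [← List.getElem?_drop]
      rw [List.getElem?_eq_getElem hk, hv]
    have hgap : ∀ m, pos < m → m < pos + 1 + k → row[m]? ≠ some n := by
      intro m hm1 hm2 hcon
      have hj : m - (pos + 1) < k := by omega
      have hjl : m - (pos + 1) < (row.drop (pos + 1)).length := by
        simp only [List.length_drop]; omega
      have : (row.drop (pos + 1))[m - (pos + 1)]? = some n := by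
        rw [List.getElem?_drop, show pos + 1 + (m - (pos + 1)) = m by omega]; exact hcon
      rw [List.getElem?_eq_getElem hjl] at this
      exact hmin _ hj (Option.some_injective _ this)
    rw [ih]
    by_cases hm : row[i]? = some n
    · rcases Nat.lt_trichotomy i (pos + 1 + k) with hi | hi | hi
      · have hip : ¬ pos < i := fun hp => hgap i hp hi hm
        rw [if_neg (fun hc => absurd hc.1 (by omega)),
          if_neg (fun hc : pos < i ∧ _ => hip hc.1)]
        simp [List.getElem?_set, show pos + 1 + k ≠ i by omega]
      · subst hi
        rw [if_neg (fun hc => absurd hc.1 (by omega)), if_pos ⟨by omega, hm⟩]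
        by_cases hs : pos + 1 + k < sr.length
        · simp [List.getElem?_set, hs, List.getElem?_eq_getElem hs]
        · simp [List.getElem?_set, hs,
            List.getElem?_eq_none (by omega : sr.length ≤ pos + 1 + k)]
      · rw [if_pos ⟨hi, hm⟩, if_pos ⟨by omega, hm⟩]
        simp [List.getElem?_set, show pos + 1 + k ≠ i by omega]
    · rw [if_neg (fun hc => hm hc.2), if_neg (fun hc : pos < i ∧ _ => hm hc.2)]
      have hne : pos + 1 + k ≠ i := by
        intro he; exact hm (he ▸ hval)
      simp [List.getElem?_set, hne]
  | case2 sr pos h =>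
    rw [whileA, h]
    rw [if_neg]
    rintro ⟨hp, hm⟩
    have hmem : n ∈ row.drop (pos + 1) := by
      have : (row.drop (pos + 1))[i - (pos + 1)]? = some n := by
        rw [List.getElem?_drop, show pos + 1 + (i - (pos + 1)) = i by omega]; exact hm
      exact List.mem_of_getElem? this
    exact ((PySem.List.index?_eq_none_iff _ _).mp h) hmem

theorem rowA_eq_markRow (row : List Int) (n : Int) (sr : List Bool) :
    (match PySem.List.index? row n with
     | some pos => whileA row n (sr.set pos true) pos
     | none => sr) = markRow sr row n := by
  cases h : PySem.List.index? row n with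
  | none =>
    apply List.ext_getElem?
    intro i
    rw [markRow_getElem?, if_neg]
    intro hm
    exact ((PySem.List.index?_eq_none_iff _ _).mp h) (List.mem_of_getElem? hm)
  | some q =>
    obtain ⟨hq, hvq, hminq⟩ := PySem.List.getElem_of_index?_eq_some h
    apply List.ext_getElem?
    intro i
    rw [whileA_getElem?, markRow_getElem?]
    by_cases hm : row[i]? = some n
    · rcases Nat.lt_trichotomy i q with hi | hi | hi
      · exfalso
        have : i < row.length := by omega
        rw [List.getElem?_eq_getElem this] at hm
        exact hminq i hi (Option.some_injective _ hm)
      · subst hi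
        rw [if_neg (fun hc => absurd hc.1 (by omega)), if_pos hm]
        by_cases hs : i < sr.length
        · simp [List.getElem?_set, hs, List.getElem?_eq_getElem hs]
        · simp [List.getElem?_set, hs, List.getElem?_eq_none (by omega : sr.length ≤ i)]
      · rw [if_pos ⟨hi, hm⟩, if_pos hm]
        simp [List.getElem?_set, show q ≠ i by omega]
    · rw [if_neg (fun hc => hm hc.2), if_neg hm]
      have hne : q ≠ i := by
        intro he
        subst he
        rw [List.getElem?_eq_getElem hq, hvq] at hm
        exact hm rfl
      simp [List.getElem?_set, hne]

theorem key_eq (cards_state : List (List (List Bool))) (bingo_cards : List (List (List Int)))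
    (number_drawn : Int) :
    update_cards_state cards_state bingo_cards number_drawn
      = update_cards_state_alt cards_state bingo_cards number_drawn := by
  unfold update_cards_state update_cards_state_alt
  -- A's per-card step collapses to one modify with the canonical per-row marking
  have h1 : (fun (st : List (List (List Bool))) (card_number : Nat) =>
      (List.range 5).foldl (fun st row_number =>
        match PySem.List.index? ((bingo_cards.getD card_number []).getD row_number []) number_drawn with
        | some position =>
            st.modify card_number (fun card => card.modify row_number (fun sr =>
              whileA ((bingo_cards.getD card_number []).getD row_number []) number_drawn
                (sr.set position true) position))
        | none => st) st)
      = (fun st card_number => st.modify card_number (fun card =>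
          (List.range 5).foldl (fun card row_number =>
            card.modify row_number (fun sr =>
              markRow sr ((bingo_cards.getD card_number []).getD row_number []) number_drawn)) card)) := by
    funext st c
    have h2 : (fun (st : List (List (List Bool))) (r : Nat) =>
        match PySem.List.index? ((bingo_cards.getD c []).getD r []) number_drawn with
        | some position =>
            st.modify c (fun card => card.modify r (fun sr =>
              whileA ((bingo_cards.getD c []).getD r []) number_drawn
                (sr.set position true) position))
        | none => st)
        = (fun st r => st.modify c (fun card => card.modify r (fun sr =>
            markRow sr ((bingo_cards.getD c []).getD r []) number_drawn))) := by
      funext st r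
      cases h : PySem.List.index? ((bingo_cards.getD c []).getD r []) number_drawn with
      | none =>
        have hrow : ∀ sr : List Bool,
            markRow sr ((bingo_cards.getD c []).getD r []) number_drawn = sr := by
          intro sr
          have := rowA_eq_markRow ((bingo_cards.getD c []).getD r []) number_drawn sr
          rw [h] at this
          exact this.symm
        simp only []
        rw [modify_pointwise_id]
        intro card
        rw [modify_pointwise_id]
        exact hrow
      | some pos =>
        have hrow : (fun sr : List Bool =>
            whileA ((bingo_cards.getD c []).getD r []) number_drawn (sr.set pos true) pos)
            = (fun sr => markRow sr ((bingo_cards.getD c []).getD r []) number_drawn) := by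
          funext sr
          have := rowA_eq_markRow ((bingo_cards.getD c []).getD r []) number_drawn sr
          rw [h] at this
          exact this
        simp only [hrow]
    rw [h2, foldl_modify_fix]
  rw [h1]
  -- B's three nested loops collapse to one modify per enumerated card with the same marking
  have hB : (fun (st : List (List (List Bool))) (p : Int × List (List Int)) =>
      (List.range 5).foldl (fun st row_number =>
        (PySem.List.enumerate ((p.2).getD row_number [])).foldl (fun st q =>
          if q.2 = number_drawn then
            st.modify p.1.toNat (fun card => card.modify row_number (fun sr =>
              sr.set q.1.toNat true))
          else st) st) st)
      = (fun st p => st.modify p.1.toNat (fun card =>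
          (List.range 5).foldl (fun card row_number =>
            card.modify row_number (fun sr =>
              markRow sr ((p.2).getD row_number []) number_drawn)) card)) := by
    funext st p
    have hstep : (fun (st : List (List (List Bool))) (r : Nat) =>
        (PySem.List.enumerate ((p.2).getD r [])).foldl (fun st q =>
          if q.2 = number_drawn then
            st.modify p.1.toNat (fun card => card.modify r (fun sr => sr.set q.1.toNat true))
          else st) st)
        = (fun st r => st.modify p.1.toNat (fun card => card.modify r (fun sr =>
            markRow sr ((p.2).getD r []) number_drawn))) := by
      funext st r
      have hcell : (fun (st : List (List (List Bool))) (q : Int × Int) =>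
          if q.2 = number_drawn then
            st.modify p.1.toNat (fun card => card.modify r (fun sr => sr.set q.1.toNat true))
          else st)
          = (fun st q => st.modify p.1.toNat (fun card => card.modify r (fun sr =>
              if q.2 = number_drawn then sr.set q.1.toNat true else sr))) := by
        funext st q
        by_cases hq : q.2 = number_drawn
        · simp [hq]
        · simp only [if_neg hq]
          symm
          rw [modify_pointwise_id]
          intro card
          rw [modify_pointwise_id]
          intro sr
          rfl
      rw [hcell, foldl_modify_fix]
      congr 1
      funext card
      rw [foldl_modify_fix]
      rfl
    rw [hstep, foldl_modify_fix]
  rw [hB]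
  apply List.ext_getElem?
  intro c
  rw [getElem?_foldl_range_modify]
  have hb := getElem?_foldl_enum_modify
    (fun (card : List (List Int)) (sc : List (List Bool)) =>
      (List.range 5).foldl (fun sc row_number =>
        sc.modify row_number (fun sr =>
          markRow sr (card.getD row_number []) number_drawn)) sc)
    ([] : List (List Int)) bingo_cards 0 cards_state c
  simp only [Nat.cast_zero, Nat.sub_zero, Nat.zero_le, true_and] at hb
  rw [hb]

-- ===== VERDICT (by name: the statement is the Claim_ definition above) =====
theorem update_cards_state_spec : Claim_equal_update_cards_state := by
  intro cards_state bingo_cards number_drawn _ _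
  unfold Spec_update_cards_state
  exact key_eq cards_state bingo_cards number_drawn
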